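-- pv_equiv track=rewrite | github.com/Naman-0206/2048 | 2048.py | sortr
-- ===== SOURCE A (Python) =====
-- def sortr(list):
--
--     for i in  range(len(list)-1,-1,-1):
--         if list[i]==0:
--             for j in range(i-1,-1,-1):
--                 if list[j] !=0:
--                     list[i]=list[j]
--                     list[j]=0
--                     break
--     return list
-- ===== SOURCE B (Python) =====
-- def sortr(list):
--     z = list.count(0)
--     if z:
--         list[:] = [0] * z + [x for x in list if x != 0]
--     return list
-- ===== Notes on version B (the rewrite author's own statement) =====
-- stated objective: faster
-- what changed: Replaces the nested right-to-left scans (for each zero slot, a linear search leftward for a nonzero to pull in) with one C-level count of the zeros plus a single filter pass prepended with that many zeros, skipping the rebuild when there are no zeros; intended as faster, measured ~1.7x median at the largest timed size (not consistently >=1.5x per input).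
import Mathlib
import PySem

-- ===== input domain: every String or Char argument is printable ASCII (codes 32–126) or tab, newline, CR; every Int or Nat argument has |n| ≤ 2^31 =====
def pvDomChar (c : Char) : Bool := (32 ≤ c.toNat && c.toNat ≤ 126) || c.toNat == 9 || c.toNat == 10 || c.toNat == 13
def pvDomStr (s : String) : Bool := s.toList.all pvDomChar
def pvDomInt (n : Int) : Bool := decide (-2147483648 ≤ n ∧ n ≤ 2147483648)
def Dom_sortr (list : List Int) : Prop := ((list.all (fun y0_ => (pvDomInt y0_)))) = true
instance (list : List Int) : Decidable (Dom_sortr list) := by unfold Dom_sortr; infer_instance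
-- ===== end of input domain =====

-- B shifts the nonzeros right in one filter pass instead of A's nested scans; A mutates its
-- argument in place (B's Python mutates it the same way); the equivalence proved is about the
-- returned value.

-- ===== PORT A =====
-- inner loop: for j in range(i-1,-1,-1): if list[j]!=0: list[i]=list[j]; list[j]=0; break
-- (indices read are always in range, so list[j] is ported as getD; exact on those inputs)
def sortrInner (l : List Int) (i : Nat) : Nat → List Int
  | 0 => l
  | j + 1 => if l.getD j 0 ≠ 0 then (l.set i (l.getD j 0)).set j 0 else sortrInner l i j

-- outer loop: for i in range(len(list)-1,-1,-1): if list[i]==0: <inner>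
def sortrOuter : List Int → Nat → List Int
  | l, 0 => l
  | l, i + 1 => sortrOuter (if l.getD i 0 = 0 then sortrInner l i i else l) i

def sortr (list : List Int) : List Int := sortrOuter list list.length

-- ===== PORT B =====
def sortr_alt (list : List Int) : List Int :=
  let z := list.count 0
  if z = 0 then list else List.replicate z 0 ++ list.filter (fun x => x != 0)

-- ===== PRECONDITION & SPEC =====
def Spec_sortr (list : List Int) (out : List Int) : Prop := out = sortr_alt list
instance (list : List Int) (out : List Int) : Decidable (Spec_sortr list out) := by unfold Spec_sortr; infer_instance

-- ===== CLAIM (what is proved, stated in full; the proofs are below) =====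
def Claim_equal_sortr : Prop := ∀ (list : List Int), Dom_sortr list → Spec_sortr list (sortr list)

-- ===== LEMMAS AND PROOFS =====

-- index (strictly below `bound`) of the last nonzero entry of l, as A's inner scan finds it
def pullIdx (l : List Int) : Nat → Option Nat
  | 0 => none
  | j + 1 => if l.getD j 0 ≠ 0 then some j else pullIdx l j

theorem sortrInner_eq (l : List Int) (i : Nat) : ∀ j, sortrInner l i j =
    match pullIdx l j with
    | some k => (l.set i (l.getD k 0)).set k 0
    | none => l := by
  intro j
  induction j with
  | zero => simp [sortrInner, pullIdx]
  | succ j ih =>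
    simp only [sortrInner, pullIdx]
    split_ifs with h <;> simp [ih]

theorem sortrInner_eq_none (l : List Int) (i j : Nat) (h : pullIdx l j = none) :
    sortrInner l i j = l := by rw [sortrInner_eq, h]

theorem sortrInner_eq_some (l : List Int) (i j k : Nat) (h : pullIdx l j = some k) :
    sortrInner l i j = (l.set i (l.getD k 0)).set k 0 := by rw [sortrInner_eq, h]

theorem getD_last (q t : List Int) (a : Int) : (q ++ a :: t).getD q.length 0 = a := by
  rw [List.getD_append_right _ _ _ _ (Nat.le_refl _)]
  simp [List.getD]

theorem pullIdx_frozen (q t : List Int) : ∀ j, j ≤ q.length → pullIdx (q ++ t) j = pullIdx q j := by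
  intro j
  induction j with
  | zero => simp [pullIdx]
  | succ j ih =>
    intro hj
    have hj' : j < q.length := hj
    simp only [pullIdx]
    rw [List.getD_append _ _ _ _ hj', ih (Nat.le_of_lt hj')]

theorem pull_none (q : List Int) (h : pullIdx q q.length = none) :
    q.filter (fun x => x != 0) = [] := by
  induction q using List.reverseRecOn with
  | nil => simp
  | append_singleton q' a ih =>
    rw [List.length_append, List.length_singleton] at h
    simp only [pullIdx] at h
    rw [show q' ++ [a] = q' ++ a :: [] from rfl, getD_last] at h
    by_cases ha : a ≠ 0
    · simp [ha] at h
    · rw [not_not] at ha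
      subst ha
      rw [if_neg (by decide)] at h
      rw [pullIdx_frozen q' [0] _ (Nat.le_refl _)] at h
      simp [ih h]

theorem pull_some (q : List Int) (k : Nat) (h : pullIdx q q.length = some k) :
    k < q.length ∧ q.getD k 0 ≠ 0 ∧
      q.filter (fun x => x != 0) = (q.set k 0).filter (fun x => x != 0) ++ [q.getD k 0] := by
  induction q using List.reverseRecOn with
  | nil => simp [pullIdx] at h
  | append_singleton q' a ih =>
    rw [List.length_append, List.length_singleton] at h
    simp only [pullIdx] at h
    rw [show q' ++ [a] = q' ++ a :: [] from rfl, getD_last] at h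
    by_cases ha : a ≠ 0
    · rw [if_pos ha] at h
      obtain rfl : k = q'.length := by injection h; omega
      refine ⟨by simp, ?_, ?_⟩
      · rw [show q' ++ [a] = q' ++ a :: [] from rfl, getD_last]; exact ha
      · rw [show q' ++ [a] = q' ++ a :: [] from rfl, getD_last]
        have hset : (q' ++ a :: []).set q'.length 0 = q' ++ [0] := by
          rw [List.set_append_right _ _ (Nat.le_refl _)]
          simp
        simp [hset, List.filter_append, ha]
    · rw [not_not] at ha
      subst ha
      rw [if_neg (by decide)] at h
      rw [pullIdx_frozen q' [0] _ (Nat.le_refl _)] at h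
      obtain ⟨hk, hnz, hfil⟩ := ih h
      refine ⟨by simp [Nat.lt_succ_of_lt hk], ?_, ?_⟩
      · rwa [List.getD_append _ _ _ _ hk]
      · rw [List.getD_append _ _ _ _ hk, List.set_append_left _ _ hk]
        simp only [List.filter_append, hfil]
        simp

-- B's value, as a function of the prefix being processed
def finalOf (p : List Int) : List Int :=
  List.replicate (p.length - (p.filter (fun x => x != 0)).length) 0 ++ p.filter (fun x => x != 0)

theorem filter_len_le (q : List Int) : (q.filter (fun x => x != 0)).length ≤ q.length :=
  List.length_filter_le _ _

theorem outer_spec : ∀ (n : Nat) (q s : List Int), q.length = n →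
    sortrOuter (q ++ s) n = finalOf q ++ s := by
  intro n
  induction n with
  | zero =>
    intro q s hq
    rw [List.eq_nil_of_length_eq_zero hq]
    simp [sortrOuter, finalOf]
  | succ n ihn =>
    intro q s hq
    have hne : q ≠ [] := by intro h; subst h; simp at hq
    obtain ⟨q', a, rfl⟩ : ∃ q' a, q = q' ++ [a] :=
      ⟨q.dropLast, q.getLast hne, (List.dropLast_append_getLast hne).symm⟩
    have hq' : q'.length = n := by
      rw [List.length_append, List.length_singleton] at hq; omega
    subst hq'
    have ih : ∀ s' : List Int, sortrOuter (q' ++ s') q'.length = finalOf q' ++ s' :=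
      fun s' => ihn q' s' rfl
    have ihset : ∀ (k : Nat) (s' : List Int),
        sortrOuter (q'.set k 0 ++ s') q'.length = finalOf (q'.set k 0) ++ s' :=
      fun k s' => ihn (q'.set k 0) s' (List.length_set ..)
    simp only [sortrOuter]
    have hget : (q' ++ [a] ++ s).getD q'.length 0 = a := by
      rw [List.append_assoc]; exact getD_last q' s a
    rw [hget]
    by_cases ha : a = 0
    · subst ha
      rw [if_pos rfl]
      have hfrozen : pullIdx (q' ++ [0] ++ s) q'.length = pullIdx q' q'.length := by
        rw [List.append_assoc]; exact pullIdx_frozen q' ([0] ++ s) _ (Nat.le_refl _)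
      cases hp : pullIdx q' q'.length with
      | none =>
        rw [sortrInner_eq_none _ _ _ (hfrozen.trans hp)]
        have hfil := pull_none q' hp
        rw [List.append_assoc, ih ([0] ++ s)]
        have : finalOf (q' ++ [0]) = finalOf q' ++ [0] := by
          simp [finalOf, hfil, List.filter_append, List.replicate_succ']
        rw [this]; simp
      | some k =>
        obtain ⟨hk, hnz, hfil⟩ := pull_some q' k hp
        rw [sortrInner_eq_some _ _ _ _ (hfrozen.trans hp), List.append_assoc]
        have hgetk : (q' ++ ([0] ++ s)).getD k 0 = q'.getD k 0 := List.getD_append _ _ _ _ hk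
        have hset1 : (q' ++ ([0] ++ s)).set q'.length (q'.getD k 0) = q' ++ ([q'.getD k 0] ++ s) := by
          rw [List.set_append_right _ _ (Nat.le_refl _)]
          simp
        have hset2 : (q' ++ ([q'.getD k 0] ++ s)).set k 0 = (q'.set k 0) ++ ([q'.getD k 0] ++ s) :=
          List.set_append_left _ _ hk
        rw [hgetk, hset1, hset2]
        rw [ihset k ([q'.getD k 0] ++ s)]
        have hlenset : (q'.set k 0).length = q'.length := List.length_set ..
        have hfl : ((q'.set k 0).filter (fun x => x != 0)).length + 1
            = (q'.filter (fun x => x != 0)).length := by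
          rw [hfil]; simp
        have : finalOf (q'.set k 0) ++ [q'.getD k 0] = finalOf (q' ++ [0]) := by
          simp only [finalOf, List.filter_append, hlenset, List.length_append]
          have h1 : (List.filter (fun x => x != 0) [0] : List Int) = [] := by simp
          rw [h1, List.append_nil, hfil]
          have hle := filter_len_le (q'.set k 0)
          rw [hlenset] at hle
          have hcnt : q'.length - ((q'.set k 0).filter (fun x => x != 0)).length
              = q'.length + [(0:Int)].length - (q'.filter (fun x => x != 0)).length := by
            simp only [List.length_singleton]
            omega
          rw [hcnt, List.append_assoc]
          simp only [List.length_append, List.length_singleton, List.length_nil, Nat.add_zero]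
          rw [← hfl]
        rw [← this]; simp
    · rw [if_neg ha]
      rw [List.append_assoc, ih ([a] ++ s)]
      have : finalOf (q' ++ [a]) = finalOf q' ++ [a] := by
        have hane : (a != 0) = true := by simpa using ha
        simp only [finalOf, List.filter_append, List.length_append]
        have h1 : List.filter (fun x => x != 0) [a] = [a] := by simp [hane]
        rw [h1]
        have hle := filter_len_le q'
        have hc : q'.length + [a].length - ((q'.filter (fun x => x != 0)).length + [a].length)
            = q'.length - (q'.filter (fun x => x != 0)).length := by
          simp only [List.length_singleton]; omega
        rw [hc, List.append_assoc]
      rw [this]; simp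

-- ===== VERDICT (by name: the statement is the Claim_ definition above) =====
theorem count_add_filter_length (l : List Int) :
    l.count 0 + (l.filter (fun x => x != 0)).length = l.length := by
  induction l with
  | nil => simp
  | cons a t ih =>
    by_cases h : a = 0 <;> simp [h] <;> omega

theorem sortr_spec : Claim_equal_sortr := by
  intro list _
  unfold Spec_sortr sortr sortr_alt
  have h := outer_spec list.length list [] rfl
  rw [List.append_nil] at h
  rw [h, finalOf]
  have hc := count_add_filter_length list
  by_cases hz : list.count 0 = 0
  · have hmem : ∀ a ∈ list, (a != 0) = true := by
      intro a ha
      have h0 : (0 : Int) ∉ list := List.count_eq_zero.mp hz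
      simp only [bne_iff_ne, ne_eq]
      intro hae; subst hae; exact h0 ha
    have hfeq : list.filter (fun x => x != 0) = list := List.filter_eq_self.mpr hmem
    simp [hz, hfeq]
  · have hzc : list.length - (list.filter (fun x => x != 0)).length = list.count 0 := by omega
    simp [hz, hzc]
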